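-- pv_equiv track=rewrite | github.com/knoebber/leet | trip/zero_sum.py | tripplet
-- ===== SOURCE A (Python) =====
-- def tripplet(lst) :
--   l = len(lst)
--   if l < 3 :
--     return []
--   if l == 3 :
--     return [lst]
--   else :
--     x = lst.pop()
--     xs = tripplet(lst)
--     new = []
--     for t in xs :
--       new += [[x,t[1],t[2]]
--              ,[t[0],x,t[2]]
--              ,[t[0],t[1],x]]
--     return xs + new
-- ===== SOURCE B (Python) =====
-- def tripplet(lst):
--     if len(lst) < 3:
--         return []
--     extras = lst[3:]
--     del lst[3:]
--     result = [lst]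
--     for x in extras:
--         new = [sub for t in result
--                for sub in ([x, t[1], t[2]], [t[0], x, t[2]], [t[0], t[1], x])]
--         result = result + new
--     return result
-- ===== Notes on version B (the rewrite author's own statement) =====
-- stated objective: simpler
-- what changed: Replaced A's tail-popping recursion (recursive call per trailing element, then expand) by a single left-to-right loop: slice off the elements past index 2, seed result with the mutated 3-element list, and for each extra x append the three substituted triplets of every triplet built so far.
import Mathlib
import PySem

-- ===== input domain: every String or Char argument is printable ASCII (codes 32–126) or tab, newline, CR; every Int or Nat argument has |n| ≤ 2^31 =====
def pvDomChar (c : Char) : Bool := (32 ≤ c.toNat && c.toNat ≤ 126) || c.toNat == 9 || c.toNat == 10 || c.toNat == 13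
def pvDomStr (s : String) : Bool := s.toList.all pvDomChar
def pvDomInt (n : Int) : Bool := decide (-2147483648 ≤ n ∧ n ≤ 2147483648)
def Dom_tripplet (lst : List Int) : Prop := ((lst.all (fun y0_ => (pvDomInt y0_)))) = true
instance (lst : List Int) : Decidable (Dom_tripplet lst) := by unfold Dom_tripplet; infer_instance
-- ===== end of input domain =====

-- B replaces A's tail-popping recursion by a single left-to-right loop over the elements
-- past index 2 (objective: simpler, same cost). Both Pythons mutate lst in place down to
-- its first three elements and return that very object as the first triplet; the theorems
-- below are about the RETURN value (the two Pythons perform the identical mutation).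

-- ===== PORT A =====
-- t[i] on a Python list: all reached accesses are on length-3 triplets, so the
-- .getD 0 default of the exact PySem.List.pyGet? is never taken.
def pvAt (t : List Int) (i : Int) : Int := (PySem.List.pyGet? t i).getD 0

def tripplet (lst : List Int) : List (List Int) :=
  if lst.length < 3 then []
  else if lst.length = 3 then [lst]
  else
    match h : PySem.List.pop? lst with
    | none => []   -- unreachable: lst.length > 3
    | some (x, rest) =>
      let xs := tripplet rest
      let new := xs.foldl (fun new t =>
        new ++ [[x, pvAt t 1, pvAt t 2],
                [pvAt t 0, x, pvAt t 2],
                [pvAt t 0, pvAt t 1, x]]) []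
      xs ++ new
termination_by lst.length
decreasing_by
  have h2 : rest.length + 1 = lst.length := PySem.List.length_of_pop?_eq_some lst h
  omega

-- ===== PORT B =====
def tripplet_alt (lst : List Int) : List (List Int) :=
  if lst.length < 3 then []
  else
    (lst.drop 3).foldl (fun result x =>
      result ++ result.flatMap (fun t =>
        [[x, pvAt t 1, pvAt t 2],
         [pvAt t 0, x, pvAt t 2],
         [pvAt t 0, pvAt t 1, x]]))
      [lst.take 3]

-- ===== PRECONDITION & SPEC =====
def Spec_tripplet (lst : List Int) (out : List (List Int)) : Prop := out = tripplet_alt lst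
instance (lst : List Int) (out : List (List Int)) : Decidable (Spec_tripplet lst out) := by unfold Spec_tripplet; infer_instance

-- ===== CLAIM (what is proved, stated in full; the proofs are below) =====
def Claim_equal_tripplet : Prop := ∀ (lst : List Int), Dom_tripplet lst → Spec_tripplet lst (tripplet lst)

-- ===== LEMMAS AND PROOFS =====

-- the substitution step both programs perform for one extra element x
def pvSub (x : Int) (t : List Int) : List (List Int) :=
  [[x, pvAt t 1, pvAt t 2], [pvAt t 0, x, pvAt t 2], [pvAt t 0, pvAt t 1, x]]

theorem tripplet_core (lst : List Int) (h3 : 3 ≤ lst.length) :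
    tripplet lst =
      (lst.drop 3).foldl
        (fun result x => result ++ result.flatMap (pvSub x)) [lst.take 3] := by
  induction lst using List.reverseRecOn with
  | nil => simp at h3
  | append_singleton ys x ih =>
    by_cases hy : ys.length < 3
    · -- total length is exactly 3
      have hlen : ys.length = 2 := by
        have := List.length_append (as := ys) (bs := [x]); simp at h3 ⊢; omega
      rw [tripplet.eq_def]
      have hl : (ys ++ [x]).length = 3 := by simp [hlen]
      rw [if_neg (by omega), if_pos hl]
      have hdrop : (ys ++ [x]).drop 3 = [] := by
        apply List.drop_eq_nil_of_le; omega
      have htake : (ys ++ [x]).take 3 = ys ++ [x] :=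
        List.take_of_length_le (by omega)
      rw [hdrop, htake]; rfl
    · -- length ≥ 4: A pops x, recurses on ys
      rw [not_lt] at hy
      have hl4 : 4 ≤ (ys ++ [x]).length := by simp; omega
      rw [tripplet.eq_def]
      rw [if_neg (by omega), if_neg (by omega)]
      rw [PySem.List.pop?_last ys x]
      simp only
      rw [PySem.List.foldl_append_eq_flatMap
            (g := fun t => [[x, pvAt t 1, pvAt t 2],
                            [pvAt t 0, x, pvAt t 2],
                            [pvAt t 0, pvAt t 1, x]])]
      rw [List.drop_append_of_le_length (by omega),
          List.take_append_of_le_length (by omega)]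
      rw [List.foldl_append]
      rw [ih hy]
      rfl

-- ===== VERDICT (by name: the statement is the Claim_ definition above) =====
theorem tripplet_spec : Claim_equal_tripplet := by
  intro lst _
  unfold Spec_tripplet tripplet_alt
  by_cases h : lst.length < 3
  · rw [tripplet.eq_def, if_pos h, if_pos h]
  · rw [if_neg h, tripplet_core lst (by omega)]
    rfl
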